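-- pv_equiv track=rewrite | github.com/JC67999/best-practice | mcp-servers/project_mcp.py | _generate_objective_summary
-- ===== SOURCE A (Python) =====
-- from typing import Any, Dict, List, Optional, Tuple
--
-- def _generate_objective_summary(answers: Dict) -> Dict:
--     """Generate objective summary from answers."""
--     summary = {
--         "problem": "",
--         "target_user": "",
--         "solution": "",
--         "success_metrics": "",
--         "constraints": ""
--     }
--
--     # Extract key information
--     for question_id, answer_data in answers.items():
--         answer = answer_data.get("answer", "")
--
--         if question_id.startswith("problem_"):
--             summary["problem"] += answer + " "
--         elif question_id.startswith("target_user"):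
--             summary["target_user"] += answer + " "
--         elif question_id.startswith("solution_"):
--             summary["solution"] += answer + " "
--         elif question_id.startswith("success_metrics"):
--             summary["success_metrics"] += answer + " "
--         elif question_id.startswith("constraints"):
--             summary["constraints"] += answer + " "
--
--     # Clean up
--     for key in summary:
--         summary[key] = summary[key].strip()
--
--     return summary
-- ===== SOURCE B (Python) =====
-- # B: five independent per-category passes (valid because the five prefixes are
-- # pairwise incomparable, so no question id can match two of them); no buckets,
-- # no elif chain, each summary string built in one expression.
--
-- def _collect(answers, prefix):
--     return "".join(
--         answer_data.get("answer", "") + " "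
--         for question_id, answer_data in answers.items()
--         if question_id.startswith(prefix)
--     ).strip()
--
-- def _generate_objective_summary(answers):
--     return {
--         "problem": _collect(answers, "problem_"),
--         "target_user": _collect(answers, "target_user"),
--         "solution": _collect(answers, "solution_"),
--         "success_metrics": _collect(answers, "success_metrics"),
--         "constraints": _collect(answers, "constraints"),
--     }
-- ===== Notes on version B (the rewrite author's own statement) =====
-- stated objective: alternative
-- what changed: Replaces A's single pass with a five-way if/elif chain mutating accumulator strings by five independent per-category filter passes, each summary built in one join expression; correct because the five prefixes are pairwise incomparable so no id matches two categories.
import Mathlib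
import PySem

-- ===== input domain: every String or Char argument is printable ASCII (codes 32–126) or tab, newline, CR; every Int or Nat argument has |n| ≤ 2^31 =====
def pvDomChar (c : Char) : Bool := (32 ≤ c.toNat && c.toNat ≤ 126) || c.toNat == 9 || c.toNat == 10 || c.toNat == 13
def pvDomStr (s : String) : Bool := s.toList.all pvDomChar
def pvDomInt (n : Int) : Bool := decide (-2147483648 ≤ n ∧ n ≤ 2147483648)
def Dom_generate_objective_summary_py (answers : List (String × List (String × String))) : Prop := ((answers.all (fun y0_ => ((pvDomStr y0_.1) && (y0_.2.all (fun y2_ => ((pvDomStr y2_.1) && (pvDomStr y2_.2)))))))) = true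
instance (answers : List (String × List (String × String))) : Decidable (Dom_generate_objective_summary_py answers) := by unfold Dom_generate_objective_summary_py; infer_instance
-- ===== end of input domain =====

-- B replaces A's single pass with a five-way if/elif chain mutating accumulator strings by five
-- independent per-category filter passes (valid since the prefixes are pairwise incomparable); same cost.

-- ===== PORT A =====
def generate_objective_summary_py (answers : List (String × List (String × String))) : List (String × String) :=
  let summary : PySem.Dict String String :=
    PySem.Dict.mk [("problem", ""), ("target_user", ""), ("solution", ""), ("success_metrics", ""), ("constraints", "")]
  let summary := answers.foldl (fun summary qa =>
      let answer := (PySem.Dict.mk qa.2).getD "answer" ""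
      if PySem.Str.startswith qa.1 "problem_" then summary.modify "problem" "" (· ++ (answer ++ " "))
      else if PySem.Str.startswith qa.1 "target_user" then summary.modify "target_user" "" (· ++ (answer ++ " "))
      else if PySem.Str.startswith qa.1 "solution_" then summary.modify "solution" "" (· ++ (answer ++ " "))
      else if PySem.Str.startswith qa.1 "success_metrics" then summary.modify "success_metrics" "" (· ++ (answer ++ " "))
      else if PySem.Str.startswith qa.1 "constraints" then summary.modify "constraints" "" (· ++ (answer ++ " "))
      else summary) summary
  let summary := summary.keys.foldl (fun d k => d.insert k (PySem.Str.strip (d.getD k ""))) summary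
  summary.items

-- ===== PORT B =====
-- _collect of Source B: one filter pass for one category, joined and stripped
def pvCollect (answers : List (String × List (String × String))) (pre : String) : String :=
  PySem.Str.strip (PySem.Str.join ""
    ((answers.filter (fun qa => PySem.Str.startswith qa.1 pre)).map
      (fun qa => (PySem.Dict.mk qa.2).getD "answer" "" ++ " ")))

def generate_objective_summary_py_alt (answers : List (String × List (String × String))) : List (String × String) :=
  [("problem", pvCollect answers "problem_"),
   ("target_user", pvCollect answers "target_user"),
   ("solution", pvCollect answers "solution_"),
   ("success_metrics", pvCollect answers "success_metrics"),
   ("constraints", pvCollect answers "constraints")]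

-- ===== PRECONDITION & SPEC =====
def Spec_generate_objective_summary_py (answers : List (String × List (String × String))) (out : List (String × String)) : Prop := out = generate_objective_summary_py_alt answers
instance (answers : List (String × List (String × String))) (out : List (String × String)) : Decidable (Spec_generate_objective_summary_py answers out) := by unfold Spec_generate_objective_summary_py; infer_instance

-- ===== CLAIM (what is proved, stated in full; the proofs are below) =====
def Claim_equal_generate_objective_summary_py : Prop := ∀ (answers : List (String × List (String × String))), Dom_generate_objective_summary_py answers → Spec_generate_objective_summary_py answers (generate_objective_summary_py answers)

-- ===== LEMMAS AND PROOFS =====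

-- two incomparable prefixes cannot both start the same string
lemma sw_excl (q p1 p2 : String)
    (h12 : ¬ (p1.toList <+: p2.toList)) (h21 : ¬ (p2.toList <+: p1.toList))
    (h : PySem.Str.startswith q p1 = true) : PySem.Str.startswith q p2 = false := by
  by_contra hb
  rw [Bool.not_eq_false] at hb
  rw [PySem.Str.startswith_eq, PySem.Chars.startswith_iff] at h hb
  rcases List.prefix_or_prefix_of_prefix h hb with h' | h'
  exacts [h12 h', h21 h']

-- A's summary dict with its five fixed keys
def mkS (p t s m c : String) : PySem.Dict String String :=
  PySem.Dict.mk [("problem", p), ("target_user", t), ("solution", s), ("success_metrics", m), ("constraints", c)]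

-- the answers of the category with prefix `pre`, in order
def selF (pre : String) (answers : List (String × List (String × String))) : List String :=
  (answers.filter (fun qa => PySem.Str.startswith qa.1 pre)).map
    (fun qa => (PySem.Dict.mk qa.2).getD "answer" "")

-- "".join(a + ' ' for a in L)
def cstr (L : List String) : String := PySem.Str.join "" (L.map (· ++ " "))

lemma cstr_nil : cstr [] = "" := rfl

lemma cstr_cons (x : String) (L : List String) : cstr (x :: L) = (x ++ " ") ++ cstr L := by
  apply String.ext
  cases L with
  | nil => simp [cstr, PySem.Str.join, PySem.Chars.join, List.intercalate]
  | cons y t => simp [cstr, PySem.Str.join, PySem.Chars.join, List.intercalate]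

lemma selF_nil (pre : String) : selF pre [] = [] := rfl

lemma selF_cons (pre : String) (qa : String × List (String × String)) (l : List (String × List (String × String))) :
    selF pre (qa :: l)
    = if PySem.Str.startswith qa.1 pre = true then ((PySem.Dict.mk qa.2).getD "answer" "") :: selF pre l else selF pre l := by
  simp only [selF, List.filter_cons]
  split_ifs with h
  · simp
  · simp

lemma mkS_modify_p (p t s m c : String) (f : String → String) :
    (mkS p t s m c).modify "problem" "" f = mkS (f p) t s m c := by
  simp [mkS, PySem.Dict.modify, PySem.Dict.insert, PySem.Dict.getD, PySem.Dict.get?, PySem.Dict.contains]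
lemma mkS_modify_t (p t s m c : String) (f : String → String) :
    (mkS p t s m c).modify "target_user" "" f = mkS p (f t) s m c := by
  simp [mkS, PySem.Dict.modify, PySem.Dict.insert, PySem.Dict.getD, PySem.Dict.get?, PySem.Dict.contains]
lemma mkS_modify_s (p t s m c : String) (f : String → String) :
    (mkS p t s m c).modify "solution" "" f = mkS p t (f s) m c := by
  simp [mkS, PySem.Dict.modify, PySem.Dict.insert, PySem.Dict.getD, PySem.Dict.get?, PySem.Dict.contains]
lemma mkS_modify_m (p t s m c : String) (f : String → String) :
    (mkS p t s m c).modify "success_metrics" "" f = mkS p t s (f m) c := by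
  simp [mkS, PySem.Dict.modify, PySem.Dict.insert, PySem.Dict.getD, PySem.Dict.get?, PySem.Dict.contains]
lemma mkS_modify_c (p t s m c : String) (f : String → String) :
    (mkS p t s m c).modify "constraints" "" f = mkS p t s m (f c) := by
  simp [mkS, PySem.Dict.modify, PySem.Dict.insert, PySem.Dict.getD, PySem.Dict.get?, PySem.Dict.contains]

lemma A_fold (l : List (String × List (String × String))) :
    ∀ (p t s m c : String),
    l.foldl (fun summary qa =>
      let answer := (PySem.Dict.mk qa.2).getD "answer" ""
      if PySem.Str.startswith qa.1 "problem_" then summary.modify "problem" "" (· ++ (answer ++ " "))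
      else if PySem.Str.startswith qa.1 "target_user" then summary.modify "target_user" "" (· ++ (answer ++ " "))
      else if PySem.Str.startswith qa.1 "solution_" then summary.modify "solution" "" (· ++ (answer ++ " "))
      else if PySem.Str.startswith qa.1 "success_metrics" then summary.modify "success_metrics" "" (· ++ (answer ++ " "))
      else if PySem.Str.startswith qa.1 "constraints" then summary.modify "constraints" "" (· ++ (answer ++ " "))
      else summary) (mkS p t s m c)
    = mkS (p ++ cstr (selF "problem_" l)) (t ++ cstr (selF "target_user" l)) (s ++ cstr (selF "solution_" l))
          (m ++ cstr (selF "success_metrics" l)) (c ++ cstr (selF "constraints" l)) := by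
  induction l with
  | nil => intro p t s m c; simp [selF_nil, cstr_nil]
  | cons qa l ih =>
    intro p t s m c
    simp only [List.foldl_cons]
    by_cases h1 : PySem.Str.startswith qa.1 "problem_" = true
    · have e2 := sw_excl qa.1 "problem_" "target_user" (by decide) (by decide) h1
      have e3 := sw_excl qa.1 "problem_" "solution_" (by decide) (by decide) h1
      have e4 := sw_excl qa.1 "problem_" "success_metrics" (by decide) (by decide) h1
      have e5 := sw_excl qa.1 "problem_" "constraints" (by decide) (by decide) h1
      simp only [h1, if_true, mkS_modify_p, ih, selF_cons, e2, e3, e4, e5]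
      simp [cstr_cons, String.append_assoc]
    · simp only [Bool.not_eq_true] at h1
      by_cases h2 : PySem.Str.startswith qa.1 "target_user" = true
      · have e3 := sw_excl qa.1 "target_user" "solution_" (by decide) (by decide) h2
        have e4 := sw_excl qa.1 "target_user" "success_metrics" (by decide) (by decide) h2
        have e5 := sw_excl qa.1 "target_user" "constraints" (by decide) (by decide) h2
        simp only [h1, h2, Bool.false_eq_true, if_false, if_true, mkS_modify_t, ih, selF_cons, e3, e4, e5]
        simp [cstr_cons, String.append_assoc]
      · simp only [Bool.not_eq_true] at h2
        by_cases h3 : PySem.Str.startswith qa.1 "solution_" = true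
        · have e4 := sw_excl qa.1 "solution_" "success_metrics" (by decide) (by decide) h3
          have e5 := sw_excl qa.1 "solution_" "constraints" (by decide) (by decide) h3
          simp only [h1, h2, h3, Bool.false_eq_true, if_false, if_true, mkS_modify_s, ih, selF_cons, e4, e5]
          simp [cstr_cons, String.append_assoc]
        · simp only [Bool.not_eq_true] at h3
          by_cases h4 : PySem.Str.startswith qa.1 "success_metrics" = true
          · have e5 := sw_excl qa.1 "success_metrics" "constraints" (by decide) (by decide) h4
            simp only [h1, h2, h3, h4, Bool.false_eq_true, if_false, if_true, mkS_modify_m, ih, selF_cons, e5]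
            simp [cstr_cons, String.append_assoc]
          · simp only [Bool.not_eq_true] at h4
            by_cases h5 : PySem.Str.startswith qa.1 "constraints" = true
            · simp only [h1, h2, h3, h4, h5, Bool.false_eq_true, if_false, if_true, mkS_modify_c, ih, selF_cons]
              simp [cstr_cons, String.append_assoc]
            · simp only [Bool.not_eq_true] at h5
              simp only [h1, h2, h3, h4, h5, Bool.false_eq_true, if_false, ih, selF_cons]

lemma cleanup_mkS (p t s m c : String) :
    (mkS p t s m c).keys.foldl (fun d k => d.insert k (PySem.Str.strip (d.getD k ""))) (mkS p t s m c)
    = mkS (PySem.Str.strip p) (PySem.Str.strip t) (PySem.Str.strip s) (PySem.Str.strip m) (PySem.Str.strip c) := by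
  simp [mkS, PySem.Dict.keys, PySem.Dict.insert, PySem.Dict.getD, PySem.Dict.get?, PySem.Dict.contains, List.find?, List.foldl]

lemma pvCollect_eq (answers : List (String × List (String × String))) (pre : String) :
    pvCollect answers pre = PySem.Str.strip (cstr (selF pre answers)) := by
  simp [pvCollect, cstr, selF, List.map_map, Function.comp_def]

-- ===== VERDICT (by name: the statement is the Claim_ definition above) =====
theorem generate_objective_summary_py_spec : Claim_equal_generate_objective_summary_py := by
  intro answers _
  unfold Spec_generate_objective_summary_py
  unfold generate_objective_summary_py generate_objective_summary_py_alt
  simp only []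
  rw [show (PySem.Dict.mk [("problem", ""), ("target_user", ""), ("solution", ""), ("success_metrics", ""), ("constraints", "")] : PySem.Dict String String) = mkS "" "" "" "" "" from rfl,
      A_fold, cleanup_mkS]
  simp [mkS, pvCollect_eq]
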